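-- pv_equiv track=rewrite | github.com/emmalclrc1/projet-maxpar | maxpar.py | _compute_reachability
-- ===== SOURCE A (Python) =====
-- def _compute_reachability(succ):
--     """
--     Calcule quelles tâches sont atteignables depuis chaque tâche.
--     Sert à savoir si une tâche est avant une autre.
--     """
--
--     #on prepare le dictionnaire resultat
--     reach = {name: set() for name in succ}
--
--     #parcourt depuis chaque tache de depart
--     for start in succ:
--
--         visited = set() # ce qu on a visite
--         stack = [start] # stocke le graphe
--
--         while stack: #tant qu il y a des taches
--
--             node = stack.pop() #on en prend un
--
--             for nxt in succ[node]: #on regarde les successeurs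
--
--                 if nxt not in visited: # si pas visite
--                     visited.add(nxt) # on l ajoute a explorer
--                     stack.append(nxt)
--
--         reach[start] = visited # on stocke l ensemble des taches atteignables depuis start
--
--     return reach
-- ===== SOURCE B (Python) =====
-- def _compute_reachability(succ):
--     """Reachable set from each task, computed by a recursive DFS over the call
--     stack (mark all unvisited successors of a node, then pop-and-recurse on
--     each of them) instead of an explicit while-loop over a manual stack; the
--     result is built as a dict comprehension instead of pre-seeding empty sets."""
--
--     def dfs(node, visited):
--         fresh = []
--         for nxt in succ[node]:
--             if nxt in visited:
--                 continue
--             visited.add(nxt)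
--             fresh.append(nxt)
--         while fresh:
--             dfs(fresh.pop(), visited)
--
--     def reach_from(start):
--         visited = set()
--         dfs(start, visited)
--         return visited
--
--     return {start: reach_from(start) for start in succ}
-- ===== Notes on version B (the rewrite author's own statement) =====
-- stated objective: alternative
-- what changed: the per-start traversal becomes a recursive DFS over the call stack (mark all unvisited successors, then pop-and-recurse on each) instead of a while-loop over one explicit stack, and the result dict is a single dict comprehension instead of being pre-seeded with empty sets and overwritten
import Mathlib
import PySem

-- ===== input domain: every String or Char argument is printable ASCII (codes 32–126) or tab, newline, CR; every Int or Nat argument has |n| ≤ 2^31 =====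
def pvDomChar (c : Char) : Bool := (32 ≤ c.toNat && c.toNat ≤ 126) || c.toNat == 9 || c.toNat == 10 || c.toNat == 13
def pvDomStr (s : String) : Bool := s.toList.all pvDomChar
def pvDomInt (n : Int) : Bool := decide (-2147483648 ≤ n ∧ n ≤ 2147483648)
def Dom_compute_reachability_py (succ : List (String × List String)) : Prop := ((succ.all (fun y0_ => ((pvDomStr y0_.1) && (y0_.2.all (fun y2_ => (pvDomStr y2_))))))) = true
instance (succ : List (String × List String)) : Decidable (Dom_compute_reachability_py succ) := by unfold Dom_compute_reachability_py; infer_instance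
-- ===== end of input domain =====

-- B re-decomposes the per-start traversal as a recursive DFS over the call stack
-- (mark all unvisited successors, then pop-and-recurse on each) and builds the result
-- as a dict comprehension; same asymptotic cost ("alternative"), return value proved identical.

-- ===== PORT A =====
-- 'for nxt in succ[node]: if nxt not in visited: visited.add(nxt); stack.append(nxt)'
def pvScan (d : PySem.Dict String (List String)) (node : String)
    (vis : PySem.Set String) (stack : List String) : PySem.Set String × List String :=
  (d.getD node []).foldl
    (fun p nxt => if PySem.Set.contains p.1 nxt then p else (PySem.Set.add p.1 nxt, p.2 ++ [nxt]))
    (vis, stack)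

-- fuel: the while loop pops at most 1 + (number of distinct discoverable names) times;
-- |flatten of all successor lists| + 2 is a safe upper bound (totality guard only)
def pvFuel (d : PySem.Dict String (List String)) : Nat := d.values.flatten.length + 2

-- 'while stack: node = stack.pop(); for nxt in succ[node]: …' (stack.pop() = last element)
def pvLoopA (d : PySem.Dict String (List String)) :
    Nat → List String → PySem.Set String → PySem.Set String
  | 0, _, vis => vis
  | f + 1, stack, vis =>
    match stack.getLast? with
    | none => vis
    | some node =>
      let r := pvScan d node vis stack.dropLast
      pvLoopA d f r.2 r.1

def compute_reachability_py (succ : List (String × List String)) : List (String × List String) :=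
  let d := PySem.Dict.ofList succ
  -- reach = {name: set() for name in succ}
  let reach0 := d.keys.foldl (fun r name => r.insert name PySem.Set.empty)
      (PySem.Dict.empty : PySem.Dict String (List String))
  -- for start in succ: … ; reach[start] = visited
  let reach := d.keys.foldl
      (fun r start => r.insert start (pvLoopA d (pvFuel d) [start] PySem.Set.empty)) reach0
  reach.items

-- ===== PORT B =====
-- 'fresh = []; for nxt in succ[node]: if nxt in visited: continue; visited.add(nxt); fresh.append(nxt)'
def pvMark (vis : PySem.Set String) : List String → PySem.Set String × List String
  | [] => (vis, [])
  | n :: rest =>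
    if PySem.Set.contains vis n then pvMark vis rest
    else ((pvMark (PySem.Set.add vis n) rest).1, n :: (pvMark (PySem.Set.add vis n) rest).2)

-- 'while fresh: dfs(fresh.pop(), visited)'  (fresh.pop() = last element)
def pvPopAll (step : String → PySem.Set String → PySem.Set String) :
    List String → PySem.Set String → PySem.Set String
  | [], vis => vis
  | f :: fs, vis =>
    pvPopAll step (f :: fs).dropLast (step ((f :: fs).getLast (List.cons_ne_nil f fs)) vis)
  termination_by fresh _ => fresh.length
  decreasing_by simp

-- fuel for the recursive dfs (totality guard only): total successor-list length + 2
def pvFuelB (d : PySem.Dict String (List String)) : Nat :=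
  (d.values.map List.length).sum + 2

-- 'def dfs(node, visited): <mark fresh successors>; while fresh: dfs(fresh.pop(), visited)'
def pvDfsB (d : PySem.Dict String (List String)) :
    Nat → String → PySem.Set String → PySem.Set String
  | 0, _, vis => vis
  | f + 1, node, vis =>
    let m := pvMark vis (d.getD node [])
    pvPopAll (fun n v => pvDfsB d f n v) m.2 m.1

-- '{start: reach_from(start) for start in succ}' with reach_from(start) = dfs from a fresh set
def compute_reachability_py_alt (succ : List (String × List String)) : List (String × List String) :=
  let d := PySem.Dict.ofList succ
  (PySem.Dict.ofList
      (d.keys.map (fun start => (start, pvDfsB d (pvFuelB d) start PySem.Set.empty)))).items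

-- ===== PRECONDITION & SPEC =====
-- Pre_ excludes exactly the inputs on which Python A raises KeyError: a name appearing in
-- some successor list that is not itself a key of the dict (every key is a start, so every
-- listed successor is eventually looked up).
def Pre_compute_reachability_py (succ : List (String × List String)) : Prop :=
  ∀ p ∈ (PySem.Dict.ofList succ).items, ∀ v ∈ p.2, (PySem.Dict.ofList succ).contains v = true
instance (succ : List (String × List String)) : Decidable (Pre_compute_reachability_py succ) := by
  unfold Pre_compute_reachability_py; infer_instance

def pvWitness_compute_reachability_py : (List (String × List String)) :=
  [("a", ["b", "c"]), ("b", ["a"]), ("c", [])]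

def Spec_compute_reachability_py (succ : List (String × List String)) (out : List (String × List String)) : Prop := out = compute_reachability_py_alt succ
instance (succ : List (String × List String)) (out : List (String × List String)) : Decidable (Spec_compute_reachability_py succ out) := by unfold Spec_compute_reachability_py; infer_instance

-- ===== CLAIM (what is proved, stated in full; the proofs are below) =====
def Claim_equal_compute_reachability_py : Prop := ∀ (succ : List (String × List String)), Dom_compute_reachability_py succ → Pre_compute_reachability_py succ → Spec_compute_reachability_py succ (compute_reachability_py succ)

-- ===== LEMMAS AND PROOFS =====

theorem pvFoldl_mark (l : List String) : ∀ (vis : PySem.Set String) (acc : List String),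
    l.foldl (fun p nxt => if PySem.Set.contains p.1 nxt then p
      else (PySem.Set.add p.1 nxt, p.2 ++ [nxt])) (vis, acc)
      = ((pvMark vis l).1, acc ++ (pvMark vis l).2) := by
  induction l with
  | nil => intro vis acc; simp [pvMark]
  | cons x l ih =>
    intro vis acc
    by_cases h : x ∈ vis
    · simpa [pvMark, PySem.Set.contains_iff, h] using ih vis acc
    · simpa [pvMark, PySem.Set.contains_iff, h, List.append_assoc] using
        ih (PySem.Set.add vis x) (acc ++ [x])

theorem pvScan_eq (d : PySem.Dict String (List String)) (node : String)
    (vis : PySem.Set String) (acc : List String) :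
    pvScan d node vis acc
      = ((pvMark vis (d.getD node [])).1, acc ++ (pvMark vis (d.getD node [])).2) := by
  unfold pvScan; exact pvFoldl_mark _ _ _

theorem pvMark_fst (l : List String) : ∀ vis, (pvMark vis l).1 = vis ++ (pvMark vis l).2 := by
  induction l with
  | nil => intro vis; simp [pvMark]
  | cons x l ih =>
    intro vis
    by_cases h : x ∈ vis
    · simp [pvMark, h, ih]
    · simp [pvMark, h, ih, List.append_assoc]

theorem pvMark_mem (l : List String) : ∀ vis x, x ∈ (pvMark vis l).2 → x ∈ l ∧ x ∉ vis := by
  induction l with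
  | nil => intro vis x hx; simp [pvMark] at hx
  | cons y l ih =>
    intro vis x hx
    by_cases h : y ∈ vis
    · simp only [pvMark, PySem.Set.contains_iff, h, if_pos] at hx
      rcases ih vis x hx with ⟨h1, h2⟩
      exact ⟨List.mem_cons_of_mem _ h1, h2⟩
    · rw [show pvMark vis (y :: l)
          = ((pvMark (PySem.Set.add vis y) l).1, y :: (pvMark (PySem.Set.add vis y) l).2) by
        simp [pvMark, h]] at hx
      rcases List.mem_cons.mp hx with rfl | hx
      · exact ⟨List.mem_cons_self .., h⟩
      · rcases ih _ x hx with ⟨h1, h2⟩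
        refine ⟨List.mem_cons_of_mem _ h1, ?_⟩
        intro hm; exact h2 ((PySem.Set.mem_add _ _ _).mpr (Or.inl hm))

theorem pvMark_nodup (l : List String) : ∀ vis, (pvMark vis l).2.Nodup := by
  induction l with
  | nil => intro vis; simp [pvMark]
  | cons y l ih =>
    intro vis
    by_cases h : y ∈ vis
    · simpa [pvMark, PySem.Set.contains_iff, h] using ih vis
    · rw [show pvMark vis (y :: l)
          = ((pvMark (PySem.Set.add vis y) l).1, y :: (pvMark (PySem.Set.add vis y) l).2) by
        simp [pvMark, h]]
      refine List.nodup_cons.mpr ⟨?_, ih _⟩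
      intro hy
      exact (pvMark_mem l _ y hy).2 ((PySem.Set.mem_add _ _ _).mpr (Or.inr rfl))

-- the finite universe of discoverable names, and the count of not-yet-visited ones
def pvU (d : PySem.Dict String (List String)) : Finset String := d.values.flatten.toFinset
def pvUn (d : PySem.Dict String (List String)) (vis : List String) : Nat :=
  (pvU d \ vis.toFinset).card

theorem pvUn_mono (d : PySem.Dict String (List String)) {v1 v2 : List String}
    (h : ∀ x ∈ v1, x ∈ v2) : pvUn d v2 ≤ pvUn d v1 := by
  apply Finset.card_le_card
  intro x hx
  simp only [Finset.mem_sdiff, List.mem_toFinset] at *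
  exact ⟨hx.1, fun hm => hx.2 (h x hm)⟩

theorem pvMem_pvU (d : PySem.Dict String (List String)) (node x : String)
    (h : x ∈ d.getD node []) : x ∈ pvU d := by
  rcases hg : d.get? node with _ | v
  · rw [PySem.Dict.getD_eq_get?_getD, hg] at h; simp at h
  · rw [PySem.Dict.getD_eq_get?_getD, hg] at h
    simp only [Option.getD_some] at h
    have hv : v ∈ d.values := by
      have := PySem.Dict.mem_items_of_get?_eq_some (d := d) hg
      simp only [PySem.Dict.values]
      exact List.mem_map.mpr ⟨(node, v), this, rfl⟩
    simp only [pvU, List.mem_toFinset]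
    exact List.mem_flatten.mpr ⟨v, hv, h⟩

theorem pvUn_drop (d : PySem.Dict String (List String)) (vis news : List String)
    (hn : news.Nodup) (hv : ∀ x ∈ news, x ∉ vis) (hU : ∀ x ∈ news, x ∈ pvU d) :
    pvUn d (vis ++ news) + news.length = pvUn d vis := by
  have hsub : news.toFinset ⊆ pvU d \ vis.toFinset := by
    intro x hx
    simp only [List.mem_toFinset] at hx
    simp only [Finset.mem_sdiff, List.mem_toFinset]
    exact ⟨hU x hx, hv x hx⟩
  have hsplit : pvU d \ (vis ++ news).toFinset = (pvU d \ vis.toFinset) \ news.toFinset := by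
    ext x
    simp only [Finset.mem_sdiff, List.mem_toFinset, List.mem_append]
    tauto
  have hcard : news.toFinset.card = news.length := List.toFinset_card_of_nodup hn
  have hle := Finset.card_le_card hsub
  have h2 : ((pvU d \ vis.toFinset) \ news.toFinset).card
      = (pvU d \ vis.toFinset).card - news.toFinset.card := by
    rw [Finset.card_sdiff, Finset.inter_eq_left.mpr hsub]
  unfold pvUn
  rw [hsplit]
  omega

theorem pvMark_un (d : PySem.Dict String (List String)) (node : String) (vis : PySem.Set String) :
    pvUn d (pvMark vis (d.getD node [])).1 + (pvMark vis (d.getD node [])).2.length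
      = pvUn d vis := by
  rw [pvMark_fst]
  exact pvUn_drop d vis _ (pvMark_nodup _ _)
    (fun x hx => (pvMark_mem _ _ x hx).2)
    (fun x hx => pvMem_pvU d node x (pvMark_mem _ _ x hx).1)

theorem pvMark_nil_of_un_zero (d : PySem.Dict String (List String)) (node : String)
    (vis : PySem.Set String) (h : pvUn d vis = 0) :
    (pvMark vis (d.getD node [])).2 = [] := by
  rcases hs : (pvMark vis (d.getD node [])).2 with _ | ⟨y, t⟩
  · rfl
  · exfalso
    have hy : y ∈ (pvMark vis (d.getD node [])).2 := by rw [hs]; exact List.mem_cons_self ..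
    have h1 := pvMark_mem _ _ y hy
    have h2 : y ∈ pvU d \ vis.toFinset := by
      simp only [Finset.mem_sdiff, List.mem_toFinset]
      exact ⟨pvMem_pvU d node y h1.1, h1.2⟩
    have h3 := Finset.card_eq_zero.mp h
    rw [h3] at h2
    simp at h2

-- the pop-and-recurse while loop is the fold of step over the reversed list
theorem pvPopAll_concat (step : String → PySem.Set String → PySem.Set String)
    (xs : List String) (x : String) (vis : PySem.Set String) :
    pvPopAll step (xs ++ [x]) vis = pvPopAll step xs (step x vis) := by
  cases xs with
  | nil => simp [pvPopAll]
  | cons a as =>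
    rw [show (a :: as) ++ [x] = a :: (as ++ [x]) from rfl, pvPopAll]
    have h2 : (a :: (as ++ [x])).getLast (List.cons_ne_nil a (as ++ [x])) = x := by
      show ((a :: as) ++ [x]).getLast (by simp) = x
      exact List.getLast_concat ..
    have h1 : (a :: (as ++ [x])).dropLast = a :: as := by
      rw [show a :: (as ++ [x]) = (a :: as) ++ [x] from rfl, List.dropLast_concat]
    rw [h2, h1]

theorem pvPopAll_eq (step : String → PySem.Set String → PySem.Set String)
    (fresh : List String) : ∀ (vis : PySem.Set String),
    pvPopAll step fresh vis = fresh.reverse.foldl (fun v n => step n v) vis := by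
  induction fresh using List.reverseRecOn with
  | nil => intro vis; simp [pvPopAll]
  | append_singleton xs x ih =>
    intro vis
    rw [pvPopAll_concat, ih, List.reverse_append]
    rfl

-- one-step unfolding lemmas (single rewrite of the recursion, scan expressed via pvMark)
theorem pvDfsB_succ (d : PySem.Dict String (List String)) (f : Nat) (node : String)
    (vis : PySem.Set String) :
    pvDfsB d (f + 1) node vis
      = (pvMark vis (d.getD node [])).2.reverse.foldl (fun v n => pvDfsB d f n v)
          (pvMark vis (d.getD node [])).1 := by
  conv_lhs => rw [pvDfsB]
  rw [pvPopAll_eq]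

theorem pvLoopA_concat (d : PySem.Dict String (List String)) (f : Nat) (rest : List String)
    (node : String) (vis : PySem.Set String) :
    pvLoopA d (f + 1) (rest ++ [node]) vis
      = pvLoopA d f (rest ++ (pvMark vis (d.getD node [])).2) (pvMark vis (d.getD node [])).1 := by
  conv_lhs => rw [pvLoopA]
  rw [List.getLast?_concat]
  show pvLoopA d f (pvScan d node vis (rest ++ [node]).dropLast).2
        (pvScan d node vis (rest ++ [node]).dropLast).1
      = pvLoopA d f (rest ++ (pvMark vis (d.getD node [])).2) (pvMark vis (d.getD node [])).1
  rw [List.dropLast_concat, pvScan_eq]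

-- visited only grows through the recursive DFS
theorem pvDfsB_mono (d : PySem.Dict String (List String)) :
    ∀ f n vis x, x ∈ vis → x ∈ pvDfsB d f n vis := by
  intro f
  induction f with
  | zero => intro n vis x hx; simpa [pvDfsB] using hx
  | succ f ih =>
    intro n vis x hx
    have FM : ∀ (ns : List String) (v : PySem.Set String), x ∈ v →
        x ∈ ns.foldl (fun w n => pvDfsB d f n w) v := by
      intro ns
      induction ns with
      | nil => intro v hv; simpa using hv
      | cons m ns ihns => intro v hv; exact ihns _ (ih m v x hv)
    rw [pvDfsB_succ]
    exact FM _ _ (by rw [pvMark_fst]; exact List.mem_append_left _ hx)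

theorem pvDfsB_stab (d : PySem.Dict String (List String)) :
    ∀ f node vis, pvUn d vis ≤ f → pvDfsB d (f + 1) node vis = pvDfsB d f node vis := by
  intro f
  induction f with
  | zero =>
    intro node vis h
    have h0 : pvUn d vis = 0 := Nat.le_zero.mp h
    have hnil := pvMark_nil_of_un_zero d node vis h0
    have hfst : (pvMark vis (d.getD node [])).1 = vis := by
      rw [pvMark_fst, hnil, List.append_nil]
    rw [pvDfsB_succ, hnil, hfst]
    rfl
  | succ f ih =>
    intro node vis h
    rw [pvDfsB_succ, pvDfsB_succ]
    rcases hnews : (pvMark vis (d.getD node [])).2 with _ | ⟨y, t⟩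
    · rfl
    · have hun := pvMark_un d node vis
      have hlt : pvUn d (pvMark vis (d.getD node [])).1 ≤ f := by
        rw [hnews] at hun
        simp only [List.length_cons] at hun
        omega
      have FC : ∀ (ns : List String) (v : PySem.Set String),
          (∀ x ∈ (pvMark vis (d.getD node [])).1, x ∈ v) →
          ns.foldl (fun w n => pvDfsB d (f + 1) n w) v
            = ns.foldl (fun w n => pvDfsB d f n w) v := by
        intro ns
        induction ns with
        | nil => intro v _; rfl
        | cons m ns ihns =>
          intro v hv
          have hv' : pvUn d v ≤ f := le_trans (pvUn_mono d hv) hlt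
          simp only [List.foldl_cons]
          rw [ih m v hv']
          exact ihns _ (fun x hx => pvDfsB_mono d f m v x (hv x hx))
      exact FC _ _ (fun x hx => hx)

theorem pvStabUp {α : Type} (g : Nat → α) (b : Nat)
    (h : ∀ f, b ≤ f → g (f + 1) = g f) : ∀ f, b ≤ f → g f = g b := by
  intro f hf
  induction f, hf using Nat.le_induction with
  | base => rfl
  | succ n hn ih => rw [h n hn, ih]

-- the recursive DFS at a saturating fuel level (its value at every sufficient fuel)
def pvDB (d : PySem.Dict String (List String)) (n : String) (vis : PySem.Set String) :
    PySem.Set String := pvDfsB d (pvUn d vis) n vis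

theorem pvDfsB_eq (d : PySem.Dict String (List String)) (node : String)
    (vis : PySem.Set String) {f : Nat} (hf : pvUn d vis ≤ f) :
    pvDfsB d f node vis = pvDB d node vis :=
  pvStabUp (fun f => pvDfsB d f node vis) (pvUn d vis)
    (fun f h => pvDfsB_stab d f node vis h) f hf

theorem pvLoopA_nil (d : PySem.Dict String (List String)) (f : Nat) (vis : PySem.Set String) :
    pvLoopA d f [] vis = vis := by
  cases f <;> simp [pvLoopA]

theorem pvLoopA_stab (d : PySem.Dict String (List String)) :
    ∀ f stack vis, stack.length + pvUn d vis ≤ f →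
      pvLoopA d (f + 1) stack vis = pvLoopA d f stack vis := by
  intro f
  induction f with
  | zero =>
    intro stack vis h
    have hnil : stack = [] := by
      cases stack with
      | nil => rfl
      | cons a l => simp at h
    subst hnil
    simp [pvLoopA_nil]
  | succ f ih =>
    intro stack vis h
    rcases List.eq_nil_or_concat stack with rfl | ⟨rest, node, rfl⟩
    · simp [pvLoopA_nil]
    · simp only [List.concat_eq_append] at h ⊢
      rw [pvLoopA_concat, pvLoopA_concat]
      apply ih
      have hun := pvMark_un d node vis
      simp only [List.length_append, List.length_cons, List.length_nil] at h
      simp only [List.length_append]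
      omega

-- the stack machine at its saturating fuel level
def pvLA (d : PySem.Dict String (List String)) (stack : List String) (vis : PySem.Set String) :
    PySem.Set String := pvLoopA d (stack.length + pvUn d vis) stack vis

theorem pvLoopA_eq (d : PySem.Dict String (List String)) (stack : List String)
    (vis : PySem.Set String) {f : Nat} (hf : stack.length + pvUn d vis ≤ f) :
    pvLoopA d f stack vis = pvLA d stack vis :=
  pvStabUp (fun f => pvLoopA d f stack vis) (stack.length + pvUn d vis)
    (fun f h => pvLoopA_stab d f stack vis h) f hf

theorem pvLA_step (d : PySem.Dict String (List String)) (rest : List String) (node : String)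
    (vis : PySem.Set String) :
    pvLA d (rest ++ [node]) vis
      = pvLA d (rest ++ (pvMark vis (d.getD node [])).2) (pvMark vis (d.getD node [])).1 := by
  have hun := pvMark_un d node vis
  have hfuel : (rest ++ [node]).length + pvUn d vis
      = ((rest ++ (pvMark vis (d.getD node [])).2).length
          + pvUn d (pvMark vis (d.getD node [])).1) + 1 := by
    simp only [List.length_append, List.length_cons, List.length_nil]
    omega
  unfold pvLA
  rw [hfuel, pvLoopA_concat]

theorem pvDB_of_nil (d : PySem.Dict String (List String)) (node : String)
    (vis : PySem.Set String) (hnil : (pvMark vis (d.getD node [])).2 = []) :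
    pvDB d node vis = vis := by
  have hfst : (pvMark vis (d.getD node [])).1 = vis := by
    rw [pvMark_fst, hnil, List.append_nil]
  unfold pvDB
  rcases hu : pvUn d vis with _ | g
  · rfl
  · rw [pvDfsB_succ, hnil, hfst]
    rfl

-- the bridge: the stack machine equals a right-to-left fold of saturated recursive DFS calls
theorem pvBridge (d : PySem.Dict String (List String)) :
    ∀ k m stack vis, pvUn d vis ≤ k → stack.length ≤ m →
      pvLA d stack vis = stack.reverse.foldl (fun v n => pvDB d n v) vis := by
  intro k
  induction k with
  | zero =>
    intro m
    induction m with
    | zero =>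
      intro stack vis hk hm
      have hnil : stack = [] := by
        cases stack with
        | nil => rfl
        | cons a l => simp at hm
      subst hnil
      simp [pvLA, pvLoopA_nil]
    | succ m ihm =>
      intro stack vis hk hm
      rcases List.eq_nil_or_concat stack with rfl | ⟨rest, node, rfl⟩
      · simp [pvLA, pvLoopA_nil]
      · simp only [List.concat_eq_append] at hm ⊢
        have h0 : pvUn d vis = 0 := Nat.le_zero.mp hk
        have hnil := pvMark_nil_of_un_zero d node vis h0
        have hfst : (pvMark vis (d.getD node [])).1 = vis := by
          rw [pvMark_fst, hnil, List.append_nil]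
        have hstep := pvLA_step d rest node vis
        rw [hnil, hfst, List.append_nil] at hstep
        have hm' : rest.length ≤ m := by
          simp only [List.length_append, List.length_cons, List.length_nil] at hm
          omega
        rw [hstep, ihm rest vis hk hm']
        rw [List.reverse_append, List.reverse_cons, List.reverse_nil, List.nil_append,
          List.singleton_append, List.foldl_cons]
        rw [pvDB_of_nil d node vis hnil]
  | succ k ihk =>
    intro m
    induction m with
    | zero =>
      intro stack vis hk hm
      have hnil : stack = [] := by
        cases stack with
        | nil => rfl
        | cons a l => simp at hm
      subst hnil
      simp [pvLA, pvLoopA_nil]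
    | succ m ihm =>
      intro stack vis hk hm
      rcases List.eq_nil_or_concat stack with rfl | ⟨rest, node, rfl⟩
      · simp [pvLA, pvLoopA_nil]
      · simp only [List.concat_eq_append] at hm ⊢
        have hm' : rest.length ≤ m := by
          simp only [List.length_append, List.length_cons, List.length_nil] at hm
          omega
        have hstep := pvLA_step d rest node vis
        have hrhs : List.foldl (fun v n => pvDB d n v) vis (rest ++ [node]).reverse
            = List.foldl (fun v n => pvDB d n v) (pvDB d node vis) rest.reverse := by
          rw [List.reverse_append, List.reverse_cons, List.reverse_nil, List.nil_append,
            List.singleton_append, List.foldl_cons]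
        rcases hnews : (pvMark vis (d.getD node [])).2 with _ | ⟨y, t⟩
        · -- nothing newly discovered: the recursive call is the identity
          have hfst : (pvMark vis (d.getD node [])).1 = vis := by
            rw [pvMark_fst, hnews, List.append_nil]
          rw [hnews, hfst, List.append_nil] at hstep
          rw [hstep, ihm rest vis hk hm', hrhs, pvDB_of_nil d node vis hnews]
        · -- at least one discovery: the unvisited count drops, use the outer induction
          have hun := pvMark_un d node vis
          have hlen1 : 1 ≤ (pvMark vis (d.getD node [])).2.length := by
            rw [hnews]; simp
          have hk' : pvUn d (pvMark vis (d.getD node [])).1 ≤ k := by omega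
          rw [hstep, ihk (rest ++ (pvMark vis (d.getD node [])).2).length _ _ hk' le_rfl, hrhs]
          rw [List.reverse_append, List.foldl_append]
          -- the saturated call pvDB at node is exactly the fold of saturated calls
          -- over the newly discovered nodes (reversed)
          have hu1 : 1 ≤ pvUn d vis := by omega
          obtain ⟨g, hg⟩ : ∃ g, pvUn d vis = g + 1 := ⟨pvUn d vis - 1, by omega⟩
          have hgbound : pvUn d (pvMark vis (d.getD node [])).1 ≤ g := by omega
          have hDB : pvDB d node vis
              = (pvMark vis (d.getD node [])).2.reverse.foldl
                  (fun v n => pvDfsB d g n v) (pvMark vis (d.getD node [])).1 := by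
            unfold pvDB
            rw [hg, pvDfsB_succ]
          have FC2 : ∀ (ns : List String) (v : PySem.Set String),
              (∀ x ∈ (pvMark vis (d.getD node [])).1, x ∈ v) →
              ns.foldl (fun w n => pvDfsB d g n w) v
                = ns.foldl (fun w n => pvDB d n w) v := by
            intro ns
            induction ns with
            | nil => intro v _; rfl
            | cons n2 ns ihns =>
              intro n2v hv
              have hv' : pvUn d n2v ≤ g := le_trans (pvUn_mono d hv) hgbound
              simp only [List.foldl_cons]
              rw [pvDfsB_eq d n2 n2v hv']
              refine ihns _ (fun x hx => ?_)
              unfold pvDB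
              exact pvDfsB_mono d _ n2 n2v x (hv x hx)
          rw [hDB, FC2 _ _ (fun x hx => hx)]

-- ===== result-dictionary plumbing =====

theorem pvGetFoldlNot (f : String → List String) :
    ∀ (ks : List String) (r : PySem.Dict String (List String)) (k : String), k ∉ ks →
      (ks.foldl (fun r k => r.insert k (f k)) r).get? k = r.get? k := by
  intro ks
  induction ks with
  | nil => intro r k _; rfl
  | cons k' ks ih =>
    intro r k hk
    simp only [List.foldl_cons]
    rw [ih _ k (fun h => hk (List.mem_cons_of_mem _ h))]
    exact PySem.Dict.get?_insert_of_ne r _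
      (fun h => hk (by rw [h]; exact List.mem_cons_self ..))

theorem pvGetFoldl (f : String → List String) :
    ∀ (ks : List String) (r : PySem.Dict String (List String)) (k : String),
      ks.Nodup → k ∈ ks →
      (ks.foldl (fun r k => r.insert k (f k)) r).get? k = some (f k) := by
  intro ks
  induction ks with
  | nil => intro r k _ hk; simp at hk
  | cons k' ks ih =>
    intro r k hnd hk
    have hnd' := List.nodup_cons.mp hnd
    simp only [List.foldl_cons]
    rcases List.mem_cons.mp hk with rfl | hk2
    · rw [pvGetFoldlNot f ks _ k hnd'.1]
      exact PySem.Dict.get?_insert_self ..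
    · exact ih _ k hnd'.2 hk2

theorem pvUpdateSelf : ∀ (l s : List String), (∀ x ∈ l, x ∈ s) → PySem.Set.update s l = s := by
  intro l
  induction l with
  | nil => intro s _; rfl
  | cons x l ih =>
    intro s h
    rw [PySem.Set.update_cons, PySem.Set.add_of_mem (h x (List.mem_cons_self ..))]
    exact ih s (fun y hy => h y (List.mem_cons_of_mem _ hy))

-- per start key, the two traversals agree
theorem pvKey (d : PySem.Dict String (List String)) (k : String) :
    pvLoopA d (pvFuel d) [k] PySem.Set.empty = pvDfsB d (pvFuelB d) k PySem.Set.empty := by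
  have hU : pvUn d PySem.Set.empty ≤ d.values.flatten.length := by
    have h1 : pvUn d PySem.Set.empty = (pvU d).card := by
      simp [pvUn, PySem.Set.empty]
    rw [h1]
    exact List.toFinset_card_le _
  have hFB : pvFuelB d = d.values.flatten.length + 2 := by
    simp [pvFuelB, List.length_flatten]
  have h1 : pvLoopA d (pvFuel d) [k] PySem.Set.empty = pvLA d [k] PySem.Set.empty := by
    apply pvLoopA_eq
    simp only [List.length_cons, List.length_nil, pvFuel]
    omega
  have h2 := pvBridge d (pvUn d PySem.Set.empty) 1 [k] PySem.Set.empty le_rfl (by simp)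
  rw [h1, h2]
  simp only [List.reverse_cons, List.reverse_nil, List.nil_append, List.foldl_cons,
    List.foldl_nil]
  exact (pvDfsB_eq d k PySem.Set.empty (by rw [hFB]; omega)).symm

-- A's fold produces keys.map (k, value k)
theorem pvOverwriteItems (g : String → List String) (ks : List String) (hnd : ks.Nodup)
    (r0 : PySem.Dict String (List String)) (hkeys : r0.keys = ks) :
    (ks.foldl (fun r k => r.insert k (g k)) r0).items = ks.map (fun k => (k, g k)) := by
  have hkeys1 : (ks.foldl (fun r k => r.insert k (g k)) r0).keys = ks := by
    rw [PySem.Dict.keys_foldl_insert ks (fun _ k => g k) r0, hkeys]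
    exact pvUpdateSelf ks ks (fun x hx => hx)
  have hnd1 : (ks.foldl (fun r k => r.insert k (g k)) r0).keys.Nodup := by
    rw [hkeys1]; exact hnd
  rw [PySem.Dict.items_eq_map_keys _ hnd1 [], hkeys1]
  apply List.map_congr_left
  intro k hk
  rw [PySem.Dict.getD_eq_get?_getD, pvGetFoldl g ks r0 k hnd hk]
  rfl

-- B's Dict.ofList on a pair list with distinct keys has exactly that list as items
theorem pvUpdateItems : ∀ (l : List (String × List String)) (r : PySem.Dict String (List String)),
    (l.map Prod.fst).Nodup → (∀ p ∈ l, r.contains p.1 = false) →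
    (r.update l).items = r.items ++ l := by
  intro l
  induction l with
  | nil => intro r _ _; simp [PySem.Dict.update]
  | cons p t ih =>
    intro r hnd hfresh
    simp only [List.map_cons] at hnd
    have hp := List.nodup_cons.mp hnd
    show ((r.insert p.1 p.2).update t).items = r.items ++ (p :: t)
    rw [ih _ hp.2 ?fresh]
    · rw [PySem.Dict.items_insert_of_not_contains r p.2 (hfresh p (List.mem_cons_self ..))]
      simp
    case fresh =>
      intro q hq
      rw [PySem.Dict.contains_insert]
      have hne : q.1 ≠ p.1 := fun h => hp.1 (by rw [← h]; exact List.mem_map_of_mem hq)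
      simp [hne, hfresh q (List.mem_cons_of_mem _ hq)]

theorem pvOfListItems (l : List (String × List String)) (h : (l.map Prod.fst).Nodup) :
    (PySem.Dict.ofList l).items = l := by
  have := pvUpdateItems l PySem.Dict.empty h (fun p _ => PySem.Dict.contains_empty p.1)
  simpa [PySem.Dict.ofList] using this

-- ===== VERDICT (by name: the statement is the Claim_ definition above) =====
theorem compute_reachability_py_spec : Claim_equal_compute_reachability_py := by
  intro succ _ _
  unfold Spec_compute_reachability_py
  simp only [compute_reachability_py, compute_reachability_py_alt]
  have hK : (PySem.Dict.ofList succ).keys.Nodup := PySem.Dict.nodup_keys_ofList succ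
  set d := PySem.Dict.ofList succ with hd
  have hr0keys : (d.keys.foldl (fun r name => r.insert name PySem.Set.empty)
        (PySem.Dict.empty : PySem.Dict String (List String))).keys = d.keys := by
    rw [PySem.Dict.keys_foldl_insert d.keys (fun _ _ => PySem.Set.empty) PySem.Dict.empty,
      PySem.Dict.keys_empty, PySem.Set.update_nil_left]
    exact PySem.Set.ofList_eq_self_of_nodup d.keys hK
  rw [pvOverwriteItems (fun k => pvLoopA d (pvFuel d) [k] PySem.Set.empty) d.keys hK _ hr0keys]
  have hmap : (d.keys.map (fun start => (start, pvDfsB d (pvFuelB d) start PySem.Set.empty))).map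
      Prod.fst = d.keys := by simp [Function.comp_def]
  rw [pvOfListItems _ (by rw [hmap]; exact hK)]
  apply List.map_congr_left
  intro k _
  rw [pvKey d k]
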